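-- pv_equiv track=rewrite | github.com/Fridtjon/mthesis | Tests/outputs/instance.py | _sanitize_ip
-- ===== SOURCE A (Python) =====
-- def _sanitize_ip(IP_Port):
-- 	splittet = IP_Port.split(".")
-- 	split_len = len(splittet)
-- 	ip = "{}".format(splittet[0])
-- 	for i in range(1, split_len - 1):
-- 		ip += ".{}".format(splittet[i])
--
-- 	return ip
-- 	'''
-- 	assert len(splittet) >= 4, "Error in when sanitizing IP.Port address: {}. Expected four integers but got {}.".format(IP_Port, len(splittet))
-- 	for i in range(0, 4):
-- 		subip = splittet[i]
-- 		try: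
-- 			int(subip)
-- 		except Exception as e:
-- 			raise AssertionError("Not a subip: {}".format(subip) )
--
-- 	return "{}.{}.{}.{}".format(splittet[0], splittet[1], splittet[2], splittet[3])
-- 	'''
-- ===== SOURCE B (Python) =====
-- def _sanitize_ip(IP_Port):
-- 	return IP_Port.rsplit(".", 1)[0]
-- ===== Notes on version B (the rewrite author's own statement) =====
-- stated objective: idiomatic
-- what changed: Replaces the full split into octets plus an index-loop rebuilding the prefix by repeated concatenation with a single right-split (rsplit, maxsplit 1) that takes the piece before the last separator.
import Mathlib
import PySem

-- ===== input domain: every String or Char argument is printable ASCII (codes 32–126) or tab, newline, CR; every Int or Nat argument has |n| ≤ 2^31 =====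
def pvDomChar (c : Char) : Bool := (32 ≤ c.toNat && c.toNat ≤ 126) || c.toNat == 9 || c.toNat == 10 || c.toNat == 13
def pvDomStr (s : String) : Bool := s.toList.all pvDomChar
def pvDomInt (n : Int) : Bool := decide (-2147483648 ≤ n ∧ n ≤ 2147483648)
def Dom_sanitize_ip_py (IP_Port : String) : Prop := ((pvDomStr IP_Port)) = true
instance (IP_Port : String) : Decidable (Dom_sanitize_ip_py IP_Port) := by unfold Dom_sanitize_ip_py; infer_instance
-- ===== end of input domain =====

-- B replaces A's full split('.') + index-loop concatenation by a single right-split at the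
-- last '.' (rsplit('.', 1)[0]); same return value, more idiomatic.

-- ===== PORT A =====
def sanitize_ip_py (IP_Port : String) : String :=
  let splittet := PySem.Chars.splitOn IP_Port.toList ['.']
  let split_len : Int := splittet.length
  let ip := PySem.List.pyGetD splittet 0 []
  String.ofList ((PySem.List.pyRange 1 (split_len - 1) 1).foldl
    (fun ip i => ip ++ '.' :: PySem.List.pyGetD splittet i []) ip)

-- ===== PORT B =====
-- IP_Port.rsplit(".", 1)[0], ported by hand (exact): split once at the LAST '.'
-- (located from the reversed character list); the whole string if there is no '.'.
def sanitize_ip_py_alt (IP_Port : String) : String :=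
  let cs := IP_Port.toList
  let pieces : List (List Char) :=
    if '.' ∈ cs then
      [((cs.reverse.dropWhile (· ≠ '.')).tail).reverse,
       (cs.reverse.takeWhile (· ≠ '.')).reverse]
    else [cs]
  String.ofList (PySem.List.pyGetD pieces 0 [])

-- ===== PRECONDITION & SPEC =====
def Spec_sanitize_ip_py (IP_Port : String) (out : String) : Prop := out = sanitize_ip_py_alt IP_Port
instance (IP_Port : String) (out : String) : Decidable (Spec_sanitize_ip_py IP_Port out) := by unfold Spec_sanitize_ip_py; infer_instance

-- ===== CLAIM (what is proved, stated in full; the proofs are below) =====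
def Claim_equal_sanitize_ip_py : Prop := ∀ (IP_Port : String), Dom_sanitize_ip_py IP_Port → Spec_sanitize_ip_py IP_Port (sanitize_ip_py IP_Port)

-- ===== LEMMAS AND PROOFS =====

-- structural version of Python's split('.')
def pvSplitDot : List Char → List (List Char)
  | [] => [[]]
  | c :: rest =>
      if c = '.' then [] :: pvSplitDot rest
      else
        match pvSplitDot rest with
        | [] => [[c]]
        | p :: ps => (c :: p) :: ps

-- the common value: everything before the last '.', the whole string if none
def pvSpec : List Char → List Char
  | [] => []
  | c :: rest =>
      if '.' ∈ rest then c :: pvSpec rest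
      else if c = '.' then [] else c :: pvSpec rest

-- join with '.'
def pvJoinDot : List (List Char) → List Char
  | [] => []
  | [p] => p
  | p :: q :: ps => p ++ '.' :: pvJoinDot (q :: ps)

theorem pvSplitDot_ne_nil (cs : List Char) : pvSplitDot cs ≠ [] := by
  cases cs with
  | nil => simp [pvSplitDot]
  | cons c rest =>
    simp only [pvSplitDot]
    split
    · simp
    · split <;> simp

theorem pvSplitDot_no_dot (cs : List Char) (h : '.' ∉ cs) : pvSplitDot cs = [cs] := by
  induction cs with
  | nil => rfl
  | cons c rest ih =>
    simp only [List.mem_cons, not_or] at h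
    have hc : ¬ c = '.' := fun e => h.1 e.symm
    simp only [pvSplitDot, if_neg hc, ih h.2]

theorem pvSplitDot_len (cs : List Char) (h : '.' ∈ cs) : 1 < (pvSplitDot cs).length := by
  induction cs with
  | nil => simp at h
  | cons c rest ih =>
    simp only [pvSplitDot]
    by_cases hc : c = '.'
    · simp only [if_pos hc, List.length_cons]
      have := List.length_pos_iff.mpr (pvSplitDot_ne_nil rest)
      omega
    · have hr : '.' ∈ rest := by
        rcases List.mem_cons.mp h with h1 | h1
        · exact absurd h1.symm hc
        · exact h1
      have := ih hr
      simp only [if_neg hc]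
      rcases hq : pvSplitDot rest with _ | ⟨p, ps⟩
      · exact absurd hq (pvSplitDot_ne_nil rest)
      · simp only [hq, List.length_cons] at this ⊢; omega

theorem pvSplitOn_go (fuel : Nat) : ∀ (l cur : List Char) (acc : List (List Char)),
    l.length < fuel →
    PySem.Chars.splitOn.go ['.'] fuel l cur acc =
      acc.reverse ++ (match pvSplitDot l with
        | [] => [cur.reverse]
        | p :: ps => (cur.reverse ++ p) :: ps) := by
  induction fuel with
  | zero => intro l cur acc h; omega
  | succ f ih =>
    intro l cur acc h
    cases l with
    | nil =>
      rw [PySem.Chars.splitOn.go.eq_def]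
      simp [pvSplitDot]
    | cons c rest =>
      rw [PySem.Chars.splitOn.go.eq_def]
      simp only []
      by_cases hc : c = '.'
      · have hp : List.isPrefixOf ['.'] (c :: rest) = true := by
          simp [List.isPrefixOf, hc]
        rw [if_pos hp]
        simp only [List.length_cons] at h
        simp only [List.length_singleton, List.drop_one, List.tail_cons]
        rw [ih rest [] (cur.reverse :: acc) (by omega)]
        simp only [pvSplitDot, if_pos hc]
        rcases hq : pvSplitDot rest with _ | ⟨p, ps⟩
        · exact absurd hq (pvSplitDot_ne_nil rest)
        · simp
      · have hp : List.isPrefixOf ['.'] (c :: rest) = false := by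
          simp [List.isPrefixOf]; intro h'; exact absurd h'.symm hc
        rw [if_neg (by simp [hp])]
        simp only [List.length_cons] at h
        rw [ih rest (c :: cur) acc (by omega)]
        simp only [pvSplitDot, if_neg hc]
        rcases hq : pvSplitDot rest with _ | ⟨p, ps⟩
        · exact absurd hq (pvSplitDot_ne_nil rest)
        · simp

theorem pvSplitOn_eq (cs : List Char) : PySem.Chars.splitOn cs ['.'] = pvSplitDot cs := by
  rw [PySem.Chars.splitOn.eq_def, pvSplitOn_go (cs.length + 1) cs [] [] (by omega)]
  rcases hq : pvSplitDot cs with _ | ⟨p, ps⟩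
  · exact absurd hq (pvSplitDot_ne_nil cs)
  · simp

theorem pvJoinDot_snoc (xs : List (List Char)) (y : List Char) (h : xs ≠ []) :
    pvJoinDot (xs ++ [y]) = pvJoinDot xs ++ '.' :: y := by
  induction xs with
  | nil => exact absurd rfl h
  | cons p ps ih =>
    cases ps with
    | nil => simp [pvJoinDot]
    | cons q qs =>
      have := ih (by simp)
      simp only [List.cons_append, pvJoinDot] at this ⊢
      rw [this]; simp

theorem pvFoldA (parts : List (List Char)) (hne : parts ≠ []) (k : Nat)
    (h1 : 1 ≤ k) (h2 : k ≤ parts.length) :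
    (PySem.List.pyRange 1 (k : Int) 1).foldl
      (fun ip i => ip ++ '.' :: PySem.List.pyGetD parts i []) (PySem.List.pyGetD parts 0 []) =
    pvJoinDot (parts.take k) := by
  induction k with
  | zero => omega
  | succ k ih =>
    by_cases hk : k = 0
    · subst hk
      rw [show ((1:Nat) : Int) = 1 by norm_num, PySem.List.pyRange_one_eq_nil (by norm_num)]
      rcases parts with _ | ⟨p, ps⟩
      · exact absurd rfl hne
      · have : PySem.List.pyGetD (p :: ps) 0 [] = p := by
          rw [PySem.List.pyGetD_eq_getElem (p :: ps) [] (by norm_num) (by simp)]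
          simp
        simp [pvJoinDot, this]
    · have h1k : 1 ≤ k := by omega
      have h2k : k ≤ parts.length := by omega
      rw [show ((k+1 : Nat) : Int) = (k : Int) + 1 by push_cast; ring,
          PySem.List.pyRange_one_succ_right (by exact_mod_cast h1k), List.foldl_append]
      rw [ih h1k h2k]
      simp only [List.foldl_cons, List.foldl_nil]
      have hget : PySem.List.pyGetD parts (k : Int) [] = parts[k]'(by omega) := by
        rw [PySem.List.pyGetD_eq_getElem parts [] (by positivity)
          (by exact_mod_cast (by omega : (k:Int) < (parts.length : Int)))]
        simp
      rw [hget, ← pvJoinDot_snoc _ _ (by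
        have : (List.take k parts).length = k := by simp; omega
        intro he; rw [he] at this; simp at this; omega)]
      congr 1
      rw [List.take_add_one]
      simp [List.getElem?_eq_getElem (by omega : k < parts.length)]


theorem pvSpec_no_dot (cs : List Char) (h : '.' ∉ cs) : pvSpec cs = cs := by
  induction cs with
  | nil => rfl
  | cons c rest ih =>
    simp only [List.mem_cons, not_or] at h
    have hc : ¬ c = '.' := fun e => h.1 e.symm
    simp only [pvSpec, if_neg h.2, if_neg hc, ih h.2]

theorem pvA_spec (cs : List Char) :
    pvJoinDot ((pvSplitDot cs).take (max ((pvSplitDot cs).length - 1) 1)) = pvSpec cs := by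
  induction cs with
  | nil => rfl
  | cons c rest ih =>
    by_cases hr : '.' ∈ rest
    · have hlen := pvSplitDot_len rest hr
      rcases hq : pvSplitDot rest with _ | ⟨p, ps⟩
      · exact absurd hq (pvSplitDot_ne_nil rest)
      rcases ps with _ | ⟨p2, ps2⟩
      · rw [hq] at hlen; simp at hlen
      rw [hq] at ih
      by_cases hc : c = '.'
      · -- splitDot cs = [] :: p :: p2 :: ps2
        simp only [pvSplitDot, if_pos hc, hq]
        simp only [List.length_cons] at ih ⊢
        have hm : max (ps2.length + 1 + 1 + 1 - 1) 1 = ps2.length + 2 := by omega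
        have hm' : max (ps2.length + 1 + 1 - 1) 1 = ps2.length + 1 := by omega
        rw [hm] at ⊢
        rw [hm'] at ih
        simp only [List.take_succ_cons] at ih ⊢
        -- joinDot ([] :: l) with l nonempty = '.' :: joinDot l
        have hjoin : ∀ (a : List Char) (as : List (List Char)), pvJoinDot ([] :: a :: as) = '.' :: pvJoinDot (a :: as) := by
          intro a as; simp [pvJoinDot]
        rw [hjoin]
        rw [ih]
        simp [pvSpec, hr, hc]
      · simp only [pvSplitDot, if_neg hc, hq]
        simp only [List.length_cons] at ih ⊢
        have hm : max (ps2.length + 1 + 1 - 1) 1 = ps2.length + 1 := by omega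
        rw [hm] at ih ⊢
        simp only [List.take_succ_cons] at ih ⊢
        have hjoin : ∀ (a : List Char) (l : List (List Char)),
            pvJoinDot ((c :: a) :: l) = c :: pvJoinDot (a :: l) := by
          intro a l; rcases l with _ | ⟨b, bs⟩ <;> simp [pvJoinDot]
        rw [hjoin, ih]
        simp [pvSpec, hr]
    · by_cases hc : c = '.'
      · subst hc
        have : pvSplitDot ('.' :: rest) = [] :: [rest] := by
          simp [pvSplitDot, pvSplitDot_no_dot rest hr]
        rw [this]
        simp [pvJoinDot, pvSpec, hr]
      · have hnone : '.' ∉ (c :: rest) := by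
          simp only [List.mem_cons, not_or]
          exact ⟨fun e => hc e.symm, hr⟩
        rw [pvSplitDot_no_dot _ hnone]
        simp [pvJoinDot, pvSpec, hr, hc, pvSpec_no_dot rest hr]

theorem pvB_spec (cs : List Char) (h : '.' ∈ cs) :
    ((cs.reverse.dropWhile (· ≠ '.')).tail).reverse = pvSpec cs := by
  induction cs with
  | nil => simp at h
  | cons c rest ih =>
    by_cases hr : '.' ∈ rest
    · have hne : rest.reverse.dropWhile (· ≠ '.') ≠ [] := by
        intro he
        have := List.dropWhile_eq_nil_iff.mp he
        have hm : '.' ∈ rest.reverse := by simpa using hr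
        have := this _ hm
        simp at this
      rw [List.reverse_cons, List.dropWhile_append]
      rw [if_neg (by simpa using hne)]
      rw [List.tail_append_of_ne_nil hne]
      simp only [List.reverse_append, List.reverse_cons, List.reverse_nil, List.nil_append]
      rw [ih hr]
      simp [pvSpec, hr]
    · have hc : c = '.' := by
        rcases List.mem_cons.mp h with h1 | h1
        · exact h1.symm
        · exact absurd h1 hr
      subst hc
      have hall : rest.reverse.dropWhile (· ≠ '.') = [] := by
        rw [List.dropWhile_eq_nil_iff]
        intro x hx
        simp only [ne_eq, decide_eq_true_eq]
        exact fun he => hr (he ▸ (by simpa using hx))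
      rw [List.reverse_cons, List.dropWhile_append, if_pos (by rw [hall]; rfl)]
      simp [pvSpec, hr, List.dropWhile]


theorem pvMain (cs : List Char) :
    (PySem.List.pyRange 1 (((PySem.Chars.splitOn cs ['.']).length : Int) - 1) 1).foldl
      (fun ip i => ip ++ '.' :: PySem.List.pyGetD (PySem.Chars.splitOn cs ['.']) i [])
      (PySem.List.pyGetD (PySem.Chars.splitOn cs ['.']) 0 []) = pvSpec cs := by
  rw [pvSplitOn_eq]
  rcases hq : pvSplitDot cs with _ | ⟨p, ps⟩
  · exact absurd hq (pvSplitDot_ne_nil cs)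
  rcases ps with _ | ⟨p2, ps2⟩
  · -- single piece: empty range, result is piece 0
    rw [show (((p :: ([] : List (List Char))).length : Int) - 1) = 0 by simp,
        PySem.List.pyRange_one_eq_nil (by norm_num)]
    simp only [List.foldl_nil]
    rw [PySem.List.pyGetD_eq_getElem (p :: []) [] (by norm_num) (by simp)]
    have := pvA_spec cs
    rw [hq] at this
    simpa [pvJoinDot] using this
  · have hlen : (p :: p2 :: ps2).length = ps2.length + 2 := by simp
    rw [show (((p :: p2 :: ps2).length : Int) - 1) = ((ps2.length + 1 : Nat) : Int) by
      rw [hlen]; push_cast; ring]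
    rw [pvFoldA (p :: p2 :: ps2) (by simp) (ps2.length + 1) (by omega) (by simp)]
    have := pvA_spec cs
    rw [hq] at this
    have hm : max ((p :: p2 :: ps2).length - 1) 1 = ps2.length + 1 := by
      rw [hlen]; omega
    rw [hm] at this
    exact this

-- ===== VERDICT (by name: the statement is the Claim_ definition above) =====
theorem sanitize_ip_py_spec : Claim_equal_sanitize_ip_py := by
  intro s _
  unfold Spec_sanitize_ip_py sanitize_ip_py sanitize_ip_py_alt
  simp only []
  rw [pvMain s.toList]
  by_cases h : '.' ∈ s.toList
  · rw [if_pos h]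
    rw [PySem.List.pyGetD_eq_getElem _ [] (by norm_num) (by simp)]
    have hb := pvB_spec s.toList h
    simp only [ne_eq, decide_not] at hb
    simp [← hb]
  · rw [if_neg h]
    rw [PySem.List.pyGetD_eq_getElem _ [] (by norm_num) (by simp)]
    simp [pvSpec_no_dot s.toList h]
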